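-- pv_equiv track=rewrite | github.com/Klaudia1303/student_code_analysis | Progetto-tirocinio2024/data/student_data/2067707_Zezza/LabPython08/A_Ex4.py | A_Ex4
-- ===== SOURCE A (Python) =====
-- def A_Ex4(l):
--     L=[]
--     x=-1
--     n=0
--     while x!=len(l)-1:
--         x+=1
--         for i in l:
--             if i==l[x]:
--                 n+=1
--         T=(l[x],n)
--         L.append(T)
--         n=0
--     I=set(L)
--     return I
-- ===== SOURCE B (Python) =====
-- def A_Ex4(l):
--     counts = {}
--     for i in l:
--         counts[i] = counts.get(i, 0) + 1
--     return set(counts.items())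
-- ===== Notes on version B (the rewrite author's own statement) =====
-- stated objective: faster
-- what changed: Replaces A's per-index rescan of the whole list (an O(n^2) nested loop) with a single pass that accumulates counts in a dict, then returns set(counts.items()).
import Mathlib
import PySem

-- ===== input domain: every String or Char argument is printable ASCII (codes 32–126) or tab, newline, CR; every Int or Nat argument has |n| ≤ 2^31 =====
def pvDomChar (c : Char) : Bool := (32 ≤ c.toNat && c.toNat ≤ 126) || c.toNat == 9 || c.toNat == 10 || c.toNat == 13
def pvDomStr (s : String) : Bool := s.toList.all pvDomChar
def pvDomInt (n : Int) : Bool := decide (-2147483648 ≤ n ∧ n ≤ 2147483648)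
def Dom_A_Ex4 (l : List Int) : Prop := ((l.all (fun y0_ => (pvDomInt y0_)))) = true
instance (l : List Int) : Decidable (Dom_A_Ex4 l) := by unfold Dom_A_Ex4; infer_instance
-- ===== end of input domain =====

-- B replaces A's nested per-element rescanning with one counting pass over a dict (objective: faster).


-- ===== PORT A =====
-- A: while-loop over index x = 0..len-1; inner for-loop counts occurrences of l[x]; append (l[x], n); finally set(L).
def A_Ex4 (l : List Int) : List (Int × Int) :=
  let L := (PySem.List.pyRange 0 (PySem.List.len l)).foldl
    (fun L x =>
      let n := l.foldl (fun n i => if i == PySem.List.pyGetD l x 0 then n + 1 else n) (0 : Int)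
      L ++ [(PySem.List.pyGetD l x 0, n)]) []
  PySem.Set.ofList L

-- ===== PORT B =====
-- B: one pass building a frequency dict, then set(counts.items()).
def A_Ex4_alt (l : List Int) : List (Int × Int) :=
  let counts := l.foldl (fun d i => d.insert i (d.getD i 0 + 1)) PySem.Dict.empty
  PySem.Set.ofList counts.items

-- ===== PRECONDITION & SPEC =====
def Spec_A_Ex4 (l : List Int) (out : List (Int × Int)) : Prop := out = A_Ex4_alt l
instance (l : List Int) (out : List (Int × Int)) : Decidable (Spec_A_Ex4 l out) := by unfold Spec_A_Ex4; infer_instance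

-- ===== CLAIM (what is proved, stated in full; the proofs are below) =====
def Claim_equal_A_Ex4 : Prop := ∀ (l : List Int), Dom_A_Ex4 l → Spec_A_Ex4 l (A_Ex4 l)

-- ===== LEMMAS AND PROOFS =====

-- set(l.map f) = (set l).map f for an injective f (here f v = (v, count v l), injective in its first component)
theorem set_ofList_map_inj {α β : Type} [BEq α] [LawfulBEq α] [BEq β] [LawfulBEq β]
    (f : α → β) (hinj : Function.Injective f) (l : List α) :
    PySem.Set.ofList (l.map f) = (PySem.Set.ofList l).map f := by
  induction l using List.reverseRecOn with
  | nil => rfl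
  | append_singleton t x ih =>
    rw [List.map_append, List.map_singleton, PySem.Set.ofList_append_singleton,
      PySem.Set.ofList_append_singleton, ih]
    simp only [PySem.Set.add, PySem.Set.contains, List.contains_eq_mem]
    by_cases hx : x ∈ PySem.Set.ofList t
    · simp [hx, List.mem_map_of_mem]
    · have : f x ∉ (PySem.Set.ofList t).map f := by
        intro hm
        obtain ⟨y, hy, he⟩ := List.mem_map.mp hm
        exact hx (hinj he ▸ hy)
      simp [hx, this]

-- A's appended list is exactly l.map (fun v => (v, count v l))
theorem A_list_eq (l : List Int) :
    (PySem.List.pyRange 0 (PySem.List.len l)).foldl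
      (fun L x =>
        let n := l.foldl (fun n i => if i == PySem.List.pyGetD l x 0 then n + 1 else n) (0 : Int)
        L ++ [(PySem.List.pyGetD l x 0, n)]) []
    = l.map (fun v => (v, (l.count v : Int))) := by
  simp only [PySem.List.foldl_beq_add_one, zero_add,
    PySem.List.foldl_append_singleton_eq_map, List.nil_append]
  rw [show (fun x => (PySem.List.pyGetD l x 0, ((List.count (PySem.List.pyGetD l x 0) l : Nat) : Int)))
      = (fun v => (v, ((List.count v l : Nat) : Int))) ∘ (fun j => PySem.List.pyGetD l j 0) from rfl,
    ← List.map_map, PySem.List.map_pyGetD_pyRange_zero]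

-- ===== VERDICT (by name: the statement is the Claim_ definition above) =====
theorem A_Ex4_spec : Claim_equal_A_Ex4 := by
  intro l _
  unfold Spec_A_Ex4 A_Ex4 A_Ex4_alt
  simp only []
  rw [A_list_eq, PySem.Dict.foldl_insert_getD_add_one_eq_counter, PySem.Dict.items_counter,
    set_ofList_map_inj (fun v => (v, (l.count v : Int))) (fun a b h => congrArg Prod.fst h) l,
    set_ofList_map_inj (fun v => (v, (l.count v : Int))) (fun a b h => congrArg Prod.fst h) (PySem.Set.ofList l),
    PySem.Set.ofList_ofList]
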